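-- pv_equiv track=rewrite | github.com/NetManAIOps/TraceRCA | run_localization_collect.py | root_cause_intersection
-- ===== SOURCE A (Python) =====
-- def root_cause_intersection(y_true, y_pred) -> int:
--     cnt = 0
--     # y_true = [y_true]
--     for item_a in y_true:
--         for item_b in y_pred:
--             if tuple(item_b[:len(item_a)]) == tuple(item_a):
--                 cnt += 1
--                 break
--     return cnt
-- ===== SOURCE B (Python) =====
-- def root_cause_intersection(y_true, y_pred) -> int:
--     # Build the set of all prefixes of y_pred items once, then count y_true
--     # items by a single set lookup each.
--     prefixes = set()
--     for item_b in y_pred: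
--         t = tuple(item_b)
--         for k in range(len(t) + 1):
--             prefixes.add(t[:k])
--     cnt = 0
--     for item_a in y_true:
--         if tuple(item_a) in prefixes:
--             cnt += 1
--     return cnt
-- ===== Notes on version B (the rewrite author's own statement) =====
-- stated objective: alternative
-- what changed: Replaces the nested scan (each y_true item compared against every y_pred item) with a precomputed hash set of all prefixes of y_pred items, so each y_true item costs one set lookup.
import Mathlib
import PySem

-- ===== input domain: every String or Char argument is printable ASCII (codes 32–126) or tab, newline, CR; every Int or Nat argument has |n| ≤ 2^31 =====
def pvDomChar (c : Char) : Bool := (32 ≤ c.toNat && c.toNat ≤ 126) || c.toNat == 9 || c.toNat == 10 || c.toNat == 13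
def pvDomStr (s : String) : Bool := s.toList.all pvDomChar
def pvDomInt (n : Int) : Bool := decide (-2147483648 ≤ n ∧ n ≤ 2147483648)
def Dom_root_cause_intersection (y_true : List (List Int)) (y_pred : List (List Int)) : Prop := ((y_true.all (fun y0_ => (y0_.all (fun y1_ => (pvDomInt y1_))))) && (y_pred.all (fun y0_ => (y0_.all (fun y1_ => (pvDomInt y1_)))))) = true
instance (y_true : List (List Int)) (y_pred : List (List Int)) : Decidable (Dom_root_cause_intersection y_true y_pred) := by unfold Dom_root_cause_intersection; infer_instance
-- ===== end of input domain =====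

-- B replaces A's nested scan with a precomputed set of all prefixes of y_pred
-- items, so each y_true item is decided by one set lookup (objective: alternative).

-- ===== PORT A =====
-- inner 'for item_b in y_pred: … break' loop of A
def rciInner (item_a : List Int) : List (List Int) → Int → Int
  | [], cnt => cnt
  | item_b :: rest, cnt =>
    if PySem.List.slice item_b none (some (item_a.length : Int)) = item_a then cnt + 1
    else rciInner item_a rest cnt

def root_cause_intersection (y_true : List (List Int)) (y_pred : List (List Int)) : Int :=
  y_true.foldl (fun cnt item_a => rciInner item_a y_pred cnt) 0

-- ===== PORT B =====
-- 'for k in range(len(t)+1): prefixes.add(t[:k])'; t[:k] = t.take k is exact for k ≥ 0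
def rciAddPrefixes (s : PySem.Set (List Int)) (t : List Int) : PySem.Set (List Int) :=
  (List.range (t.length + 1)).foldl (fun s k => PySem.Set.add s (t.take k)) s

def root_cause_intersection_alt (y_true : List (List Int)) (y_pred : List (List Int)) : Int :=
  let prefixes := y_pred.foldl rciAddPrefixes PySem.Set.empty
  y_true.foldl (fun cnt item_a => if PySem.Set.contains prefixes item_a then cnt + 1 else cnt) 0

-- ===== PRECONDITION & SPEC =====
def Spec_root_cause_intersection (y_true : List (List Int)) (y_pred : List (List Int)) (out : Int) : Prop := out = root_cause_intersection_alt y_true y_pred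
instance (y_true : List (List Int)) (y_pred : List (List Int)) (out : Int) : Decidable (Spec_root_cause_intersection y_true y_pred out) := by unfold Spec_root_cause_intersection; infer_instance

-- ===== CLAIM (what is proved, stated in full; the proofs are below) =====
def Claim_equal_root_cause_intersection : Prop := ∀ (y_true : List (List Int)) (y_pred : List (List Int)), Dom_root_cause_intersection y_true y_pred → Spec_root_cause_intersection y_true y_pred (root_cause_intersection y_true y_pred)

-- ===== LEMMAS AND PROOFS =====

-- A's inner loop counts 1 iff some y_pred item has item_a as prefix
theorem rciInner_eq (a : List Int) (ys : List (List Int)) (cnt : Int) :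
    rciInner a ys cnt = if ∃ b ∈ ys, b.take a.length = a then cnt + 1 else cnt := by
  induction ys with
  | nil => simp [rciInner]
  | cons b rest ih =>
    simp only [rciInner, PySem.List.slice_to_natCast]
    by_cases hb : b.take a.length = a
    · simp [hb]
    · rw [ih]; simp [hb]

theorem mem_foldl_add_take (t : List Int) (l : List Nat) (s : PySem.Set (List Int)) (a : List Int) :
    a ∈ l.foldl (fun s k => PySem.Set.add s (t.take k)) s ↔ a ∈ s ∨ ∃ k ∈ l, t.take k = a := by
  induction l generalizing s with
  | nil => simp
  | cons k rest ih =>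
    simp only [List.foldl_cons, ih, PySem.Set.mem_add, List.mem_cons]
    constructor
    · rintro (⟨h | h⟩ | ⟨j, hj, hja⟩)
      · exact Or.inl h
      · exact Or.inr ⟨k, Or.inl rfl, h.symm⟩
      · exact Or.inr ⟨j, Or.inr hj, hja⟩
    · rintro (h | ⟨j, (rfl | hj), hja⟩)
      · exact Or.inl (Or.inl h)
      · exact Or.inl (Or.inr hja.symm)
      · exact Or.inr ⟨j, hj, hja⟩

theorem exists_take_iff (t a : List Int) :
    (∃ k ∈ List.range (t.length + 1), t.take k = a) ↔ t.take a.length = a := by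
  constructor
  · rintro ⟨k, hk, rfl⟩
    rw [List.mem_range] at hk
    have : (t.take k).length = k := by simp; omega
    rw [this]
  · intro h
    have ha : a.length ≤ t.length := by
      have h2 := congrArg List.length h
      simp at h2; omega
    exact ⟨a.length, by rw [List.mem_range]; omega, h⟩

theorem mem_prefixSet (yp : List (List Int)) (s : PySem.Set (List Int)) (a : List Int) :
    a ∈ yp.foldl rciAddPrefixes s ↔ a ∈ s ∨ ∃ b ∈ yp, b.take a.length = a := by
  induction yp generalizing s with
  | nil => simp
  | cons b rest ih =>
    simp only [List.foldl_cons, ih, rciAddPrefixes, mem_foldl_add_take, exists_take_iff,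
      List.mem_cons]
    constructor
    · rintro (⟨h | h⟩ | ⟨c, hc, hca⟩)
      · exact Or.inl h
      · exact Or.inr ⟨b, Or.inl rfl, h⟩
      · exact Or.inr ⟨c, Or.inr hc, hca⟩
    · rintro (h | ⟨c, (rfl | hc), hca⟩)
      · exact Or.inl (Or.inl h)
      · exact Or.inl (Or.inr hca)
      · exact Or.inr ⟨c, hc, hca⟩

theorem root_cause_intersection_spec : Claim_equal_root_cause_intersection := by
  intro yt yp _
  unfold Spec_root_cause_intersection root_cause_intersection root_cause_intersection_alt
  have hc : ∀ a : List Int,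
      (PySem.Set.contains (yp.foldl rciAddPrefixes PySem.Set.empty) a = true) ↔
      ∃ b ∈ yp, b.take a.length = a := by
    intro a
    simp [PySem.Set.contains, mem_prefixSet, PySem.Set.empty]
  have hfun : (fun (cnt : Int) (item_a : List Int) => rciInner item_a yp cnt)
      = (fun (cnt : Int) (item_a : List Int) =>
          if PySem.Set.contains (yp.foldl rciAddPrefixes PySem.Set.empty) item_a then cnt + 1 else cnt) := by
    funext cnt a
    rw [rciInner_eq]
    exact if_congr (hc a).symm rfl rfl
  rw [hfun]
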